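-- pv_equiv track=rewrite | github.com/bvschaik/advent-of-code | 2015/day05.py | has_two_letter_duplication
-- ===== SOURCE A (Python) =====
-- def has_two_letter_duplication(string):
--     max_len = len(string) - 1
--     substrings = set()
--     last = None
--     for i in range(max_len):
--         sub = string[i] + string[i + 1]
--         if sub in substrings:
--             return True
--         substrings.add(last)
--         last = sub
--     return False
-- ===== SOURCE B (Python) =====
-- def has_two_letter_duplication(string):
--     for i in range(len(string) - 1):
--         if string[i:i+2] in string[i+2:]:
--             return True
--     return False
-- ===== Notes on version B (the rewrite author's own statement) =====
-- stated objective: idiomatic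
-- what changed: Replaces the delayed-insertion set of seen pairs with a direct loop that tests each two-letter pair for membership in the tail starting two characters later, using Python's substring search.
import Mathlib
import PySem

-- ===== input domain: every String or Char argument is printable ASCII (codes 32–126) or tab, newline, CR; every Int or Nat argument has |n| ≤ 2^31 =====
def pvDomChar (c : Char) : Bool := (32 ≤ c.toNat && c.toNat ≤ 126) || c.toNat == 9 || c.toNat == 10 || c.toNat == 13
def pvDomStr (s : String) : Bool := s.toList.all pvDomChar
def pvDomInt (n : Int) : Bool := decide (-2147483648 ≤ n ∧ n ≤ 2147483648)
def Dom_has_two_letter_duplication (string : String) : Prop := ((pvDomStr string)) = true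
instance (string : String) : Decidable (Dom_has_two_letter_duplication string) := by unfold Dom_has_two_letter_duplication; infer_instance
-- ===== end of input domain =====

-- B replaces A's delayed-insertion set of seen pairs with the idiomatic substring test
-- `string[i:i+2] in string[i+2:]`; same results, no speed claim.

-- ===== PORT A =====
-- sub = string[i] + string[i+1]; the indices i, i+1 are always in range for the loop's
-- indices (i < len - 1), so pyGetD with a dummy default is exact there.
def pvPairA (s : List Char) (i : Nat) : List Char :=
  [PySem.List.pyGetD s (i : Int) ' ', PySem.List.pyGetD s ((i : Int) + 1) ' ']

-- the loop: for i in range(max_len): … with state (substrings, last)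
def pvGoA (s : List Char) : List Nat → PySem.Set (Option (List Char)) → Option (List Char) → Bool
  | [], _, _ => false
  | i :: rest, set, last =>
      let sub := pvPairA s i
      if set.contains (some sub) then true
      else pvGoA s rest (set.add last) (some sub)

def has_two_letter_duplication (string : String) : Bool :=
  let s := string.toList
  -- max_len = len(string) - 1; range(max_len) is empty for len = 0, as is List.range (0 - 1)
  pvGoA s (List.range (s.length - 1)) PySem.Set.empty none

-- ===== PORT B =====
-- for i in range(len(string) - 1): if string[i:i+2] in string[i+2:]: return True
def pvGoB (s : List Char) : List Nat → Bool
  | [] => false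
  | i :: rest =>
      if PySem.Chars.isIn (PySem.List.slice s (some (i : Int)) (some ((i : Int) + 2)))
          (PySem.List.slice s (some ((i : Int) + 2)) none) then true
      else pvGoB s rest

def has_two_letter_duplication_alt (string : String) : Bool :=
  let s := string.toList
  pvGoB s (List.range (s.length - 1))

-- ===== PRECONDITION & SPEC =====
def Spec_has_two_letter_duplication (string : String) (out : Bool) : Prop := out = has_two_letter_duplication_alt string
instance (string : String) (out : Bool) : Decidable (Spec_has_two_letter_duplication string out) := by unfold Spec_has_two_letter_duplication; infer_instance

-- ===== CLAIM (what is proved, stated in full; the proofs are below) =====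
def Claim_equal_has_two_letter_duplication : Prop := ∀ (string : String), Dom_has_two_letter_duplication string → Spec_has_two_letter_duplication string (has_two_letter_duplication string)

-- ===== LEMMAS AND PROOFS =====

-- the two-character pair starting at index i, as a plain list expression
def pvPair (s : List Char) (i : Nat) : List Char := (s.drop i).take 2

lemma pvPairA_eq (s : List Char) (i : Nat) (h : i + 1 < s.length) :
    pvPairA s i = pvPair s i := by
  have h0 : i < s.length := by omega
  have : ((i : Int) + 1) = ((i + 1 : Nat) : Int) := by push_cast; ring
  rw [pvPairA, this, PySem.List.pyGetD_natCast, PySem.List.pyGetD_natCast,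
      List.getD_eq_getElem _ _ h0, List.getD_eq_getElem _ _ h,
      pvPair, List.drop_eq_getElem_cons h0, List.take_succ_cons,
      List.drop_eq_getElem_cons h, List.take_succ_cons, List.take_zero]

lemma pvPair_length (s : List Char) (i : Nat) (h : i + 1 < s.length) :
    (pvPair s i).length = 2 := by
  simp [pvPair]; omega

lemma pvGoA_iff (s : List Char) (m : Nat) :
    ∀ (i : Nat) (set : PySem.Set (Option (List Char))) (last : Option (List Char)),
    i + m ≤ s.length - 1 →
    (∀ x, x ∈ set ↔ ((i ≠ 0 ∧ x = none) ∨ ∃ j, j + 2 ≤ i ∧ x = some (pvPair s j))) →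
    last = (if i = 0 then none else some (pvPair s (i - 1))) →
    (pvGoA s (List.range' i m) set last = true ↔
      ∃ a b, i ≤ a ∧ a < i + m ∧ b + 2 ≤ a ∧ pvPair s b = pvPair s a) := by
  induction m with
  | zero =>
      intro i set last _ _ _
      simp [pvGoA]
      omega
  | succ m ih =>
      intro i set last hb hset hlast
      have hi1 : i + 1 < s.length := by omega
      rw [List.range'_succ, pvGoA, pvPairA_eq s i hi1]
      by_cases hc : set.contains (some (pvPair s i)) = true
      · simp only [hc, if_true, true_iff]
        rcases (hset (some (pvPair s i))).mp ((PySem.Set.contains_iff _ _).mp hc) with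
          ⟨_, h⟩ | ⟨j, hj, hje⟩
        · exact absurd h (by simp)
        · exact ⟨i, j, le_refl i, by omega, hj, by
            simpa using hje.symm⟩
      · simp only [hc, Bool.false_eq_true, if_false]
        rw [ih (i + 1) (set.add last) (some (pvPair s i)) (by omega) ?_ ?_]
        · constructor
          · rintro ⟨a, b, ha1, ha2, hb2, he⟩
            exact ⟨a, b, by omega, by omega, hb2, he⟩
          · rintro ⟨a, b, ha1, ha2, hb2, he⟩
            rcases Nat.eq_or_lt_of_le ha1 with rfl | halt
            · exfalso
              have hmem := (hset (some (pvPair s b))).mpr (Or.inr ⟨b, hb2, rfl⟩)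
              have hc' := (PySem.Set.contains_iff set (some (pvPair s b))).mpr hmem
              rw [he] at hc'
              exact hc hc'
            · exact ⟨a, b, halt, by omega, hb2, he⟩
        · intro x
          rw [PySem.Set.mem_add, hset x, hlast]
          constructor
          · rintro ((⟨hi0, h⟩ | ⟨j, hj, hje⟩) | h)
            · exact Or.inl ⟨by omega, h⟩
            · exact Or.inr ⟨j, by omega, hje⟩
            · by_cases hi0 : i = 0
              · rw [if_pos hi0] at h
                exact Or.inl ⟨by omega, h⟩
              · rw [if_neg hi0] at h
                exact Or.inr ⟨i - 1, by omega, h⟩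
          · rintro (⟨_, h⟩ | ⟨j, hj, hje⟩)
            · by_cases hi0 : i = 0
              · exact Or.inr (by rw [if_pos hi0]; exact h)
              · exact Or.inl (Or.inl ⟨hi0, h⟩)
            · by_cases hj' : j + 2 ≤ i
              · exact Or.inl (Or.inr ⟨j, hj', hje⟩)
              · have hi0 : i ≠ 0 := by omega
                have hji : j = i - 1 := by omega
                exact Or.inr (by rw [if_neg hi0]; exact hji ▸ hje)
        · simp

lemma pvGoB_iff (s : List Char) (m : Nat) :
    ∀ (i : Nat), i + m ≤ s.length - 1 →
    (pvGoB s (List.range' i m) = true ↔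
      ∃ a k, i ≤ a ∧ a < i + m ∧ pvPair s (a + 2 + k) = pvPair s a) := by
  induction m with
  | zero =>
      intro i _
      simp [pvGoB]
      omega
  | succ m ih =>
      intro i hb
      have hi1 : i + 1 < s.length := by omega
      have hcast : ((i : Int) + 2) = ((i + 2 : Nat) : Int) := by push_cast; ring
      rw [List.range'_succ, pvGoB, hcast, PySem.List.slice_natCast, PySem.List.slice_from_natCast]
      have hpair : (s.drop i).take (i + 2 - i) = pvPair s i := by
        have : i + 2 - i = 2 := by omega
        rw [this]; rfl
      rw [hpair]
      by_cases hc : PySem.Chars.isIn (pvPair s i) (s.drop (i + 2)) = true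
      · simp only [hc, if_true, true_iff]
        obtain ⟨j, hj⟩ := (PySem.Chars.exists_prefix_drop_iff_isIn _ _).mpr hc
        refine ⟨i, j, le_refl i, by omega, ?_⟩
        have hdd : (List.drop (i + 2) s).drop j = List.drop (i + 2 + j) s := by
          rw [List.drop_drop]
        rw [hdd] at hj
        have hlen : (pvPair s i).length = 2 := pvPair_length s i hi1
        have hteq := List.prefix_iff_eq_take.mp hj
        rw [hlen] at hteq
        exact hteq.symm
      · simp only [hc, Bool.false_eq_true, if_false]
        rw [ih (i + 1) (by omega)]
        constructor
        · rintro ⟨a, k, ha1, ha2, he⟩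
          exact ⟨a, k, by omega, by omega, he⟩
        · rintro ⟨a, k, ha1, ha2, he⟩
          rcases Nat.eq_or_lt_of_le ha1 with rfl | halt
          · exfalso
            apply hc
            rw [← PySem.Chars.exists_prefix_drop_iff_isIn]
            refine ⟨k, ?_⟩
            have hdd : (List.drop (i + 2) s).drop k = List.drop (i + 2 + k) s := by
              rw [List.drop_drop]
            rw [hdd]
            have hlen : (pvPair s i).length = 2 := pvPair_length s i hi1
            rw [List.prefix_iff_eq_take, hlen]
            exact he.symm
          · exact ⟨a, k, halt, by omega, he⟩

lemma pvMain (s : List Char) :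
    pvGoA s (List.range (s.length - 1)) PySem.Set.empty none =
    pvGoB s (List.range (s.length - 1)) := by
  rw [Bool.eq_iff_iff, List.range_eq_range',
      pvGoA_iff s (s.length - 1) 0 PySem.Set.empty none (by omega) ?_ (by simp),
      pvGoB_iff s (s.length - 1) 0 (by omega)]
  · constructor
    · rintro ⟨a, b, _, ha2, hb2, he⟩
      have h2 : (pvPair s a).length = 2 := pvPair_length s a (by omega)
      have hbl : (pvPair s b).length = 2 := by rw [he, h2]
      have hble : b + 1 < s.length := by
        rw [pvPair] at hbl; simp at hbl; omega
      exact ⟨b, a - b - 2, by omega, by omega, by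
        have hab : b + 2 + (a - b - 2) = a := by omega
        rw [hab]; exact he.symm⟩
    · rintro ⟨a, k, _, ha2, he⟩
      have h2 : (pvPair s a).length = 2 := pvPair_length s a (by omega)
      have hjl : (pvPair s (a + 2 + k)).length = 2 := by rw [he, h2]
      have hjle : a + 2 + k + 1 < s.length := by
        rw [pvPair] at hjl; simp at hjl; omega
      exact ⟨a + 2 + k, a, by omega, by omega, by omega, he.symm⟩
  · intro x
    constructor
    · intro h
      exact absurd h (List.not_mem_nil)
    · rintro (⟨h, _⟩ | ⟨j, hj, _⟩)
      · exact absurd rfl h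
      · omega

-- ===== VERDICT (by name: the statement is the Claim_ definition above) =====
theorem has_two_letter_duplication_spec : Claim_equal_has_two_letter_duplication := by
  intro string _
  exact pvMain string.toList
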